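-- pv_equiv track=rewrite | github.com/syntaxmonkey/Thesis | PycharmProjects/BFF/ChainCode.py | DriverFunction
-- ===== SOURCE A (Python) =====
-- codeList = [5, 6, 7, 4, -1, 0, 3, 2, 1]
--
-- def getChainCode(x1, y1, x2, y2):
-- 	dx = x2 - x1
-- 	dy = y2 - y1
-- 	hashKey = 3 * dy + dx + 4
-- 	return codeList[hashKey]
--
-- def generateChainCode(ListOfPoints):
-- 	chainCode = []
-- 	for i in range(len(ListOfPoints) - 1):
-- 		a = ListOfPoints[i]
-- 		b = ListOfPoints[i + 1]
-- 		chainCode.append(getChainCode(a[0], a[1], b[0], b[1]))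
-- 	return chainCode
--
-- def Bresenham2D(x1, y1, x2, y2):
-- 	ListOfPoints = []
-- 	ListOfPoints.append([x1, y1])
-- 	xdif = x2 - x1
-- 	ydif = y2 - y1
-- 	dx = abs(xdif)
-- 	dy = abs(ydif)
-- 	if(xdif > 0):
-- 		xs = 1
-- 	else:
-- 		xs = -1
-- 	if (ydif > 0):
-- 		ys = 1
-- 	else:
-- 		ys = -1
-- 	if (dx > dy):
--
-- 		# Driving axis is the X-axis
-- 		p = 2 * dy - dx
-- 		while (x1 != x2):
-- 			x1 += xs
-- 			if (p >= 0):
-- 				y1 += ys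
-- 				p -= 2 * dx
-- 			p += 2 * dy
-- 			ListOfPoints.append([x1, y1])
-- 	else:
--
-- 		# Driving axis is the Y-axis
-- 		p = 2 * dx-dy
-- 		while(y1 != y2):
-- 			y1 += ys
-- 			if (p >= 0):
-- 				x1 += xs
-- 				p -= 2 * dy
-- 			p += 2 * dx
-- 			ListOfPoints.append([x1, y1])
-- 	return ListOfPoints
--
-- def DriverFunction(p1,p2):
-- 	(x1, y1) = p1[0],p1[1]
-- 	(x2, y2) = p2[0],p2[1]
-- 	ListOfPoints = Bresenham2D(x1, y1, x2, y2)
-- 	chainCode = generateChainCode(ListOfPoints)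
-- 	chainCodeString = "".join(str(e) for e in chainCode)
-- 	print ('Chain code for the straight line from', (x1, y1), 'to', (x2, y2), 'is', chainCodeString)
-- 	return chainCodeString
-- ===== SOURCE B (Python) =====
-- # B: one fused Bresenham loop over the driving axis that emits the chain-code
-- # character directly (diagonal vs straight symbol precomputed once), instead of
-- # building the point list and diffing it afterward. Same print side effect.
--
-- codeList = [5, 6, 7, 4, -1, 0, 3, 2, 1]
--
-- def DriverFunction(p1, p2):
--     x1, y1 = p1[0], p1[1]
--     x2, y2 = p2[0], p2[1]
--     dxs = x2 - x1
--     dys = y2 - y1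
--     dx, dy = abs(dxs), abs(dys)
--     xs = 1 if dxs > 0 else -1
--     ys = 1 if dys > 0 else -1
--     diag = str(codeList[3 * ys + xs + 4])
--     if dx > dy:
--         straight, major, minor = str(codeList[xs + 4]), dx, dy
--     else:
--         straight, major, minor = str(codeList[3 * ys + 4]), dy, dx
--     out = []
--     p = 2 * minor - major
--     for _ in range(major):
--         if p >= 0:
--             out.append(diag)
--             p -= 2 * major
--         else:
--             out.append(straight)
--         p += 2 * minor
--     s = "".join(out)
--     print('Chain code for the straight line from', (x1, y1), 'to', (x2, y2), 'is', s)
--     return s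
-- ===== Notes on version B (the rewrite author's own statement) =====
-- stated objective: faster
-- what changed: B fuses A's three passes (build Bresenham point list, diff adjacent points into codes via list indexing, join) into one loop over the driving axis that emits the chain-code character directly, choosing between two precomputed symbols (diagonal vs straight) from the error-term test; no intermediate point list.
import Mathlib
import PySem

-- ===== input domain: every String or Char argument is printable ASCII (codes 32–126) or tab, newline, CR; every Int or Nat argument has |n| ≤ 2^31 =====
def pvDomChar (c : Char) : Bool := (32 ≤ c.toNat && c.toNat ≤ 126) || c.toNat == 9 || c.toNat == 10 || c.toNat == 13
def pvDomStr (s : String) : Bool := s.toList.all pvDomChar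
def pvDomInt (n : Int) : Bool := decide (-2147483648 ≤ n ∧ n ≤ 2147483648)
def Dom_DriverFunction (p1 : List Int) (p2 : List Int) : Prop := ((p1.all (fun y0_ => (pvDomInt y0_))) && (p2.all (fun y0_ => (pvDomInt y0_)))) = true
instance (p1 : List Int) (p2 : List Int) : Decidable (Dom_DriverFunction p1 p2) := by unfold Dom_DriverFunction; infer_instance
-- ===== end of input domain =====

-- B fuses Bresenham stepping and chain-code emission into one loop (the two possible
-- symbols per branch are precomputed), instead of A's build-points-then-diff passes.
-- Equivalence is about the RETURN value only: both Pythons also print the same line.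

-- ===== PORT A =====

def pvCodeList : List Int := [5, 6, 7, 4, -1, 0, 3, 2, 1]

-- codeList[hashKey]; at every call reached from DriverFunction the index is in 0..8,
-- so the default of pyGetD is never used there (exact on those calls)
def getChainCode (x1 y1 x2 y2 : Int) : Int :=
  let dx := x2 - x1
  let dy := y2 - y1
  let hashKey := 3 * dy + dx + 4
  PySem.List.pyGetD pvCodeList hashKey 0

-- the for-i-in-range loop of generateChainCode
def generateChainCode (pts : List (Int × Int)) : List Int :=
  (PySem.List.pyRange 0 ((pts.length : Int) - 1) 1).foldl
    (fun acc i =>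
      let a := PySem.List.pyGetD pts i (0, 0)
      let b := PySem.List.pyGetD pts (i + 1) (0, 0)
      acc ++ [getChainCode a.1 a.2 b.1 b.2]) []

-- while (x1 != x2): the fuel is exactly the number of iterations Python performs
-- at every call reached from Bresenham2D (x1 steps by ±1 toward x2)
def bresLoopX (fuel : Nat) (x1 y1 xs ys dx dy p : Int) (acc : List (Int × Int)) : List (Int × Int) :=
  match fuel with
  | 0 => acc
  | Nat.succ n =>
    let x1' := x1 + xs
    let y1' := if p ≥ 0 then y1 + ys else y1
    let p' := (if p ≥ 0 then p - 2 * dx else p) + 2 * dy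
    bresLoopX n x1' y1' xs ys dx dy p' (acc ++ [(x1', y1')])

def bresLoopY (fuel : Nat) (x1 y1 xs ys dx dy p : Int) (acc : List (Int × Int)) : List (Int × Int) :=
  match fuel with
  | 0 => acc
  | Nat.succ n =>
    let y1' := y1 + ys
    let x1' := if p ≥ 0 then x1 + xs else x1
    let p' := (if p ≥ 0 then p - 2 * dy else p) + 2 * dx
    bresLoopY n x1' y1' xs ys dx dy p' (acc ++ [(x1', y1')])

def Bresenham2D (x1 y1 x2 y2 : Int) : List (Int × Int) :=
  let xdif := x2 - x1
  let ydif := y2 - y1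
  let dx : Int := |xdif|
  let dy : Int := |ydif|
  let xs : Int := if xdif > 0 then 1 else -1
  let ys : Int := if ydif > 0 then 1 else -1
  if dx > dy then
    bresLoopX xdif.natAbs x1 y1 xs ys dx dy (2 * dy - dx) [(x1, y1)]
  else
    bresLoopY ydif.natAbs x1 y1 xs ys dx dy (2 * dx - dy) [(x1, y1)]

-- p1[0], p1[1], …: Pre_ guarantees the indices are in range, so getD is exact there;
-- the print statement is a side effect, not part of the returned value
def DriverFunction (p1 : List Int) (p2 : List Int) : String :=
  let x1 := PySem.List.pyGetD p1 0 0
  let y1 := PySem.List.pyGetD p1 1 0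
  let x2 := PySem.List.pyGetD p2 0 0
  let y2 := PySem.List.pyGetD p2 1 0
  let pts := Bresenham2D x1 y1 x2 y2
  let chainCode := generateChainCode pts
  String.mk (chainCode.foldl (fun acc e => acc ++ PySem.Int.toChars e) [])

-- ===== PORT B =====

-- the fused for-_-in-range(major) loop of Source B, emitting a symbol per step
def bresCodes (fuel : Nat) (diag straight : List Char) (major minor p : Int)
    (out : List (List Char)) : List (List Char) :=
  match fuel with
  | 0 => out
  | Nat.succ n =>
    if p ≥ 0 then
      bresCodes n diag straight major minor (p - 2 * major + 2 * minor) (out ++ [diag])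
    else
      bresCodes n diag straight major minor (p + 2 * minor) (out ++ [straight])

def DriverFunction_alt (p1 : List Int) (p2 : List Int) : String :=
  let x1 := PySem.List.pyGetD p1 0 0
  let y1 := PySem.List.pyGetD p1 1 0
  let x2 := PySem.List.pyGetD p2 0 0
  let y2 := PySem.List.pyGetD p2 1 0
  let dxs := x2 - x1
  let dys := y2 - y1
  let dx : Int := |dxs|
  let dy : Int := |dys|
  let xs : Int := if dxs > 0 then 1 else -1
  let ys : Int := if dys > 0 then 1 else -1
  let diag := PySem.Int.toChars (PySem.List.pyGetD pvCodeList (3 * ys + xs + 4) 0)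
  let smm : List Char × Int × Int :=
    if dx > dy then (PySem.Int.toChars (PySem.List.pyGetD pvCodeList (xs + 4) 0), dx, dy)
    else (PySem.Int.toChars (PySem.List.pyGetD pvCodeList (3 * ys + 4) 0), dy, dx)
  let straight := smm.1
  let major := smm.2.1
  let minor := smm.2.2
  let out := bresCodes major.toNat diag straight major minor (2 * minor - major) []
  String.mk out.flatten

-- ===== PRECONDITION & SPEC =====
-- Python A raises IndexError on p1[1]/p2[1] when either point list has fewer than
-- two coordinates; exactly those inputs are excluded.
def Pre_DriverFunction (p1 : List Int) (p2 : List Int) : Prop :=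
  2 ≤ p1.length ∧ 2 ≤ p2.length
instance (p1 : List Int) (p2 : List Int) : Decidable (Pre_DriverFunction p1 p2) := by
  unfold Pre_DriverFunction; infer_instance
def pvWitness_DriverFunction : List Int × List Int := ([0, 0], [5, 2])

def Spec_DriverFunction (p1 : List Int) (p2 : List Int) (out : String) : Prop := out = DriverFunction_alt p1 p2
instance (p1 : List Int) (p2 : List Int) (out : String) : Decidable (Spec_DriverFunction p1 p2 out) := by unfold Spec_DriverFunction; infer_instance

-- ===== CLAIM (what is proved, stated in full; the proofs are below) =====
def Claim_equal_DriverFunction : Prop := ∀ (p1 : List Int) (p2 : List Int), Dom_DriverFunction p1 p2 → Pre_DriverFunction p1 p2 → Spec_DriverFunction p1 p2 (DriverFunction p1 p2)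

-- ===== LEMMAS AND PROOFS =====

-- accumulator-free shape of bresLoopX
def ptsX (xs ys dx dy : Int) : Nat → Int → Int → Int → List (Int × Int)
  | 0, _, _, _ => []
  | Nat.succ n, x1, y1, p =>
    (x1 + xs, if p ≥ 0 then y1 + ys else y1) ::
      ptsX xs ys dx dy n (x1 + xs) (if p ≥ 0 then y1 + ys else y1)
        ((if p ≥ 0 then p - 2 * dx else p) + 2 * dy)

def ptsY (xs ys dx dy : Int) : Nat → Int → Int → Int → List (Int × Int)
  | 0, _, _, _ => []
  | Nat.succ n, x1, y1, p =>
    ((if p ≥ 0 then x1 + xs else x1), y1 + ys) ::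
      ptsY xs ys dx dy n (if p ≥ 0 then x1 + xs else x1) (y1 + ys)
        ((if p ≥ 0 then p - 2 * dy else p) + 2 * dx)

-- accumulator-free shape of bresCodes
def csB (diag straight : List Char) (major minor : Int) : Nat → Int → List (List Char)
  | 0, _ => []
  | Nat.succ n, p =>
    if p ≥ 0 then diag :: csB diag straight major minor n (p - 2 * major + 2 * minor)
    else straight :: csB diag straight major minor n (p + 2 * minor)

-- chain codes of adjacent pairs, structurally
def adjCodes : List (Int × Int) → List Int
  | a :: b :: t => getChainCode a.1 a.2 b.1 b.2 :: adjCodes (b :: t)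
  | _ => []

lemma bresLoopX_eq (xs ys dx dy : Int) :
    ∀ (n : Nat) (x1 y1 p : Int) (acc : List (Int × Int)),
    bresLoopX n x1 y1 xs ys dx dy p acc = acc ++ ptsX xs ys dx dy n x1 y1 p := by
  intro n
  induction n with
  | zero => intro x1 y1 p acc; simp [bresLoopX, ptsX]
  | succ n ih => intro x1 y1 p acc; simp [bresLoopX, ptsX, ih]

lemma bresLoopY_eq (xs ys dx dy : Int) :
    ∀ (n : Nat) (x1 y1 p : Int) (acc : List (Int × Int)),
    bresLoopY n x1 y1 xs ys dx dy p acc = acc ++ ptsY xs ys dx dy n x1 y1 p := by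
  intro n
  induction n with
  | zero => intro x1 y1 p acc; simp [bresLoopY, ptsY]
  | succ n ih => intro x1 y1 p acc; simp [bresLoopY, ptsY, ih]

lemma bresCodes_eq (diag straight : List Char) (major minor : Int) :
    ∀ (n : Nat) (p : Int) (out : List (List Char)),
    bresCodes n diag straight major minor p out = out ++ csB diag straight major minor n p := by
  intro n
  induction n with
  | zero => intro p out; simp [bresCodes, csB]
  | succ n ih => intro p out; by_cases h : p ≥ 0 <;> simp [bresCodes, csB, h, ih]

lemma adjCodes_length : ∀ (pts : List (Int × Int)), (adjCodes pts).length = pts.length - 1 := by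
  intro pts
  match pts with
  | [] => simp [adjCodes]
  | [a] => simp [adjCodes]
  | a :: b :: t => simp [adjCodes, adjCodes_length (b :: t)]

lemma adjCodes_getElem : ∀ (pts : List (Int × Int)) (k : Nat) (h : k < (adjCodes pts).length)
    (h1 : k < pts.length) (h2 : k + 1 < pts.length),
    (adjCodes pts)[k] = getChainCode pts[k].1 pts[k].2 pts[k+1].1 pts[k+1].2 := by
  intro pts
  match pts with
  | [] => intro k h; simp [adjCodes] at h
  | [a] => intro k h; simp [adjCodes] at h
  | a :: b :: t =>
    intro k h h1 h2
    match k with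
    | 0 => simp [adjCodes]
    | Nat.succ k =>
      simp only [adjCodes, List.getElem_cons_succ]
      exact adjCodes_getElem (b :: t) k (by simpa [adjCodes] using h)
        (by simpa using h1) (by simpa using h2)

-- generateChainCode (a pyRange foldl) computes adjCodes
lemma generateChainCode_eq (pts : List (Int × Int)) :
    generateChainCode pts = adjCodes pts := by
  unfold generateChainCode
  rw [PySem.List.foldl_append_singleton_eq_map]
  apply List.ext_getElem
  · simp [PySem.List.length_pyRange_one, adjCodes_length]
  · intro k hk1 hk2
    have hlen : k < pts.length - 1 := by
      simpa [PySem.List.length_pyRange_one] using hk1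
    simp only [List.nil_append]
    rw [List.getElem_map]
    rw [PySem.List.getElem_pyRange_one]
    have e1 : PySem.List.pyGetD pts ((0 : Int) + (k : Int)) (0, 0) = pts[k]'(by omega) := by
      rw [show (0 : Int) + (k : Int) = ((k : Nat) : Int) by ring]
      rw [PySem.List.pyGetD_natCast]
      exact List.getD_eq_getElem pts (0, 0) (by omega)
    have e2 : PySem.List.pyGetD pts ((0 : Int) + (k : Int) + 1) (0, 0) = pts[k+1]'(by omega) := by
      rw [show (0 : Int) + (k : Int) + 1 = ((k + 1 : Nat) : Int) by push_cast; ring]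
      rw [PySem.List.pyGetD_natCast]
      exact List.getD_eq_getElem pts (0, 0) (by omega)
    rw [e1, e2]
    rw [adjCodes_getElem pts k hk2 (by omega) (by omega)]

-- the X-driving chain codes, mapped to characters, are exactly B's fused codes
lemma codesX_eq (xs ys dx dy : Int) : ∀ (n : Nat) (x1 y1 p : Int),
    (adjCodes ((x1, y1) :: ptsX xs ys dx dy n x1 y1 p)).map PySem.Int.toChars
    = csB (PySem.Int.toChars (PySem.List.pyGetD pvCodeList (3 * ys + xs + 4) 0))
          (PySem.Int.toChars (PySem.List.pyGetD pvCodeList (xs + 4) 0)) dx dy n p := by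
  intro n
  induction n with
  | zero => intro x1 y1 p; simp [ptsX, adjCodes, csB]
  | succ n ih =>
    intro x1 y1 p
    by_cases h : p ≥ 0
    · simp only [ptsX, adjCodes, List.map_cons, csB, getChainCode, if_pos h]
      rw [show 3 * (y1 + ys - y1) + (x1 + xs - x1) + 4 = 3 * ys + xs + 4 by ring, ih]
    · simp only [ptsX, adjCodes, List.map_cons, csB, getChainCode, if_neg h]
      rw [show 3 * (y1 - y1) + (x1 + xs - x1) + 4 = xs + 4 by ring, ih]

lemma codesY_eq (xs ys dx dy : Int) : ∀ (n : Nat) (x1 y1 p : Int),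
    (adjCodes ((x1, y1) :: ptsY xs ys dx dy n x1 y1 p)).map PySem.Int.toChars
    = csB (PySem.Int.toChars (PySem.List.pyGetD pvCodeList (3 * ys + xs + 4) 0))
          (PySem.Int.toChars (PySem.List.pyGetD pvCodeList (3 * ys + 4) 0)) dy dx n p := by
  intro n
  induction n with
  | zero => intro x1 y1 p; simp [ptsY, adjCodes, csB]
  | succ n ih =>
    intro x1 y1 p
    by_cases h : p ≥ 0
    · simp only [ptsY, adjCodes, List.map_cons, csB, getChainCode, if_pos h]
      rw [show 3 * (y1 + ys - y1) + (x1 + xs - x1) + 4 = 3 * ys + xs + 4 by ring, ih]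
    · simp only [ptsY, adjCodes, List.map_cons, csB, getChainCode, if_neg h]
      rw [show 3 * (y1 + ys - y1) + (x1 - x1) + 4 = 3 * ys + 4 by ring, ih]

lemma foldl_append_toChars (l : List Int) :
    ∀ init : List Char,
    l.foldl (fun acc e => acc ++ PySem.Int.toChars e) init
      = init ++ (l.map PySem.Int.toChars).flatten := by
  induction l with
  | nil => intro init; simp
  | cons a t ih => intro init; simp [ih, List.append_assoc]

-- the whole pipelines agree for arbitrary endpoint coordinates
lemma core_eq (x1 y1 x2 y2 : Int) :
    String.mk ((generateChainCode (Bresenham2D x1 y1 x2 y2)).foldl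
      (fun acc e => acc ++ PySem.Int.toChars e) [])
    = String.mk
        (let dxs := x2 - x1
         let dys := y2 - y1
         let dx : Int := |dxs|
         let dy : Int := |dys|
         let xs : Int := if dxs > 0 then 1 else -1
         let ys : Int := if dys > 0 then 1 else -1
         let diag := PySem.Int.toChars (PySem.List.pyGetD pvCodeList (3 * ys + xs + 4) 0)
         let smm : List Char × Int × Int :=
           if dx > dy then (PySem.Int.toChars (PySem.List.pyGetD pvCodeList (xs + 4) 0), dx, dy)
           else (PySem.Int.toChars (PySem.List.pyGetD pvCodeList (3 * ys + 4) 0), dy, dx)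
         (bresCodes smm.2.1.toNat diag smm.1 smm.2.1 smm.2.2 (2 * smm.2.2 - smm.2.1) []).flatten) := by
  simp only [Bresenham2D]
  by_cases h : |x2 - x1| > |y2 - y1|
  · simp only [h, if_true]
    rw [bresLoopX_eq, bresCodes_eq, generateChainCode_eq, foldl_append_toChars]
    simp only [List.nil_append, List.singleton_append]
    rw [codesX_eq]
    congr 1
    rw [show |x2 - x1|.toNat = (x2 - x1).natAbs by rw [Int.abs_eq_natAbs]; omega]
  · simp only [h, if_false]
    rw [bresLoopY_eq, bresCodes_eq, generateChainCode_eq, foldl_append_toChars]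
    simp only [List.nil_append, List.singleton_append]
    rw [codesY_eq]
    congr 1
    rw [show |y2 - y1|.toNat = (y2 - y1).natAbs by rw [Int.abs_eq_natAbs]; omega]

-- ===== VERDICT (by name: the statement is the Claim_ definition above) =====
theorem DriverFunction_spec : Claim_equal_DriverFunction := by
  intro p1 p2 _hdom _hpre
  unfold Spec_DriverFunction DriverFunction DriverFunction_alt
  exact core_eq _ _ _ _
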